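-- pv_equiv track=rewrite | github.com/beobmun/3_1_algorithm | algorithm/week_5/202155642_한법문.py | solution
-- ===== SOURCE A (Python) =====
-- def impossible_case(front, side, top):
--     if not len(front) or not len(side):
--         return (True)
--     if (len(top)):
--         for t in top:
--             if not (type(t) == list) or not (len(t)):
--                 return (True)
--     else:
--         return (True)
--     if not (max(front) == max(side)):   # 블럭의 높이 수 체크
--         return (True)
--     elif not (len(front) == len(top)):  # front 폭과 top 가로폭 체크
--         return (True)
--     max_top = max(max(i) for i in top)
--     if not (max_top == len(side)):      # side 폭과 top_max(=위에서 봤을 때 뒤로 제일 많이 나간 곳) 체크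
--         return (True)
--     return (False)
--
-- def solution(front, side, top):
--     if (impossible_case(front, side, top)):
--         return (0)
--     stacked_block = []
--     for _ in range(0, len(side)):
--         stacked_block += [list(front)]
--
--     for i in range(0, len(stacked_block)):
--         row = stacked_block[i]
--         if (max(row) > side[i]):
--             for col in range(0, len(front)):
--                 if (row[col] > side[i]):
--                     row[col] = side[i]
--
--     for col in range(0, len(top)):
--         col_min = min(top[col]) - 1
--         col_max = max(top[col]) - 1
--         for row in range(0, len(stacked_block)):
--             if (row < col_min or row > col_max or not row + 1 in top[col]):
--                 stacked_block[row][col] = 0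
--
--     answer = 0
--     for r_block in stacked_block:
--         answer += sum(r_block)
--     return (answer)
-- ===== SOURCE B (Python) =====
-- def impossible_case(front, side, top):
--     if not len(front) or not len(side):
--         return (True)
--     if (len(top)):
--         for t in top:
--             if not (type(t) == list) or not (len(t)):
--                 return (True)
--     else:
--         return (True)
--     if not (max(front) == max(side)):
--         return (True)
--     elif not (len(front) == len(top)):
--         return (True)
--     max_top = max(max(i) for i in top)
--     if not (max_top == len(side)):
--         return (True)
--     return (False)
--
-- def solution(front, side, top):
--     if impossible_case(front, side, top):
--         return 0
--     answer = 0
--     for col in range(len(top)):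
--         for r in set(top[col]):
--             if 1 <= r <= len(side):
--                 answer += min(front[col], side[r - 1])
--     return answer
-- ===== Notes on version B (the rewrite author's own statement) =====
-- stated objective: simpler
-- what changed: B keeps the impossible_case guard but replaces A's build-a-grid (replicate front per side row) + in-place clip pass + zero pass + sum pass with a single direct accumulation: for each column it adds min(front[col], side[r-1]) for every distinct in-range r in top[col].
import Mathlib
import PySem

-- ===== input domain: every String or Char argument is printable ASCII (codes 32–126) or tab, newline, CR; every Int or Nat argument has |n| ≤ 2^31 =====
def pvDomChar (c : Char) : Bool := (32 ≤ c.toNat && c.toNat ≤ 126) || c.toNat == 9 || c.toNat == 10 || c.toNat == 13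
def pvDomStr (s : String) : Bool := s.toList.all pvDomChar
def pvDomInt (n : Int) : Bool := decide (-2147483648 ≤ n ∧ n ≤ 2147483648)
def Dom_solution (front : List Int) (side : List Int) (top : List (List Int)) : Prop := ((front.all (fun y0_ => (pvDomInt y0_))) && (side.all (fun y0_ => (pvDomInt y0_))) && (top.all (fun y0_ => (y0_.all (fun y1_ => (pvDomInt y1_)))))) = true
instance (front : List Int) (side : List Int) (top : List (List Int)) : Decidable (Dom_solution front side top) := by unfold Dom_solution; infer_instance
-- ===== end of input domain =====

-- B replaces A's grid building/clipping/zeroing/summing with one direct accumulation over top; return value proved equal everywhere.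

-- ===== PORT A =====
-- shared helper (Source B keeps impossible_case verbatim): the `type(t) == list` test is always
-- true under the typed signature and is dropped; inner `max(i)` runs only after the guard has
-- established every i nonempty, so `.getD 0` below is never taken.
def impossible_case (front : List Int) (side : List Int) (top : List (List Int)) : Bool :=
  if front.length = 0 || side.length = 0 then true
  else if top.length ≠ 0 then
    if top.any (fun t => t.length = 0) then true
    else if PySem.List.max? front (fun x => x) ≠ PySem.List.max? side (fun x => x) then true
    else if front.length ≠ top.length then true
    else
      let max_top := PySem.List.max? (top.map (fun i => (PySem.List.max? i (fun x => x)).getD 0)) (fun x => x)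
      if max_top ≠ some (side.length : Int) then true else false
  else true

def solution (front : List Int) (side : List Int) (top : List (List Int)) : Int :=
  if impossible_case front side top then 0
  else
    -- stacked_block built by repeated `+= [list(front)]`
    let sb0 : List (List Int) := (List.range side.length).foldl (fun sb _ => sb ++ [front]) []
    -- clip pass: row i mutated in place where it exceeds side[i]
    let sb1 : List (List Int) := (List.range sb0.length).foldl (fun sb i =>
      let row := sb.getD i []
      if (PySem.List.max? row (fun x => x)).getD 0 > side.getD i 0 then
        sb.set i ((List.range front.length).foldl (fun r c =>
          if r.getD c 0 > side.getD i 0 then r.set c (side.getD i 0) else r) row)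
      else sb) sb0
    -- zero pass
    let sb2 : List (List Int) := (List.range top.length).foldl (fun sb col =>
      let t := top.getD col []
      let cmin := (PySem.List.min? t (fun x => x)).getD 0 - 1
      let cmax := (PySem.List.max? t (fun x => x)).getD 0 - 1
      (List.range sb.length).foldl (fun sb (row : Nat) =>
        if ((row : Int) < cmin || (row : Int) > cmax || !(t.contains ((row : Int) + 1))) then
          sb.set row ((sb.getD row []).set col 0)
        else sb) sb) sb1
    sb2.foldl (fun a r => a + r.sum) 0

-- ===== PORT B =====
def solution_alt (front : List Int) (side : List Int) (top : List (List Int)) : Int :=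
  if impossible_case front side top then 0
  else
    (List.range top.length).foldl (fun ans col =>
      (PySem.Set.ofList (top.getD col [])).foldl (fun ans r =>
        if 1 ≤ r ∧ r ≤ (side.length : Int) then
          ans + min (front.getD col 0) (side.getD (r - 1).toNat 0)
        else ans) ans) 0

-- ===== PRECONDITION & SPEC =====
def Spec_solution (front : List Int) (side : List Int) (top : List (List Int)) (out : Int) : Prop := out = solution_alt front side top
instance (front : List Int) (side : List Int) (top : List (List Int)) (out : Int) : Decidable (Spec_solution front side top out) := by unfold Spec_solution; infer_instance

-- ===== CLAIM (what is proved, stated in full; the proofs are below) =====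
def Claim_equal_solution : Prop := ∀ (front : List Int) (side : List Int) (top : List (List Int)), Dom_solution front side top → Spec_solution front side top (solution front side top)

-- ===== LEMMAS AND PROOFS =====

theorem getD_append_len {α : Type} (l1 l2 : List α) (k : Nat) (d : α) (h : l1.length = k) :
    (l1 ++ l2).getD k d = l2.getD 0 d := by
  subst h
  simp [List.getD_eq_getElem?_getD, List.getElem?_append_right]

-- a single pass `for i in range(len(sb)): if c(i, sb[i]): sb[i] = f(i, sb[i])` in map form
theorem foldl_set_range_aux {α : Type} (d : α) (c : Nat → α → Bool) (f : Nat → α → α)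
    (step : List α → Nat → List α)
    (hstep : ∀ s i, step s i = if c i (s.getD i d) then s.set i (f i (s.getD i d)) else s)
    (sb : List α) :
    ∀ k, k ≤ sb.length →
      (List.range k).foldl step sb
        = (List.range k).map (fun i => if c i (sb.getD i d) then f i (sb.getD i d) else sb.getD i d) ++ sb.drop k := by
  intro k
  induction k with
  | zero => simp
  | succ k ih =>
    intro hk
    have hk' : k ≤ sb.length := by omega
    have hlt : k < sb.length := by omega
    rw [List.range_succ, List.foldl_append, List.map_append, ih hk']
    simp only [List.foldl_cons, List.foldl_nil, hstep]
    have hlen : ((List.range k).map (fun i => if c i (sb.getD i d) then f i (sb.getD i d) else sb.getD i d)).length = k := by simp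
    have hg : (((List.range k).map (fun i => if c i (sb.getD i d) then f i (sb.getD i d) else sb.getD i d)) ++ sb.drop k).getD k d = sb.getD k d := by
      rw [getD_append_len _ _ _ _ hlen]
      simp [List.getD_eq_getElem?_getD, List.getElem?_drop]
    have hget : sb.getD k d = sb[k] := by
      simp [List.getD_eq_getElem?_getD, List.getElem?_eq_getElem hlt]
    have hdrop : List.drop k sb = sb[k] :: List.drop (k+1) sb := List.drop_eq_getElem_cons hlt
    rw [hg, hget]
    by_cases hc : c k sb[k]
    · simp only [hc, if_true]
      rw [List.set_append_right _ _ (by omega)]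
      rw [hlen, Nat.sub_self]
      simp only [hdrop, List.set_cons_zero, List.map_cons, List.map_nil]
      simp [hc, List.getElem?_eq_getElem hlt]
    · simp only [hc]
      simp only [hdrop, List.map_cons, List.map_nil]
      simp [hc, List.getElem?_eq_getElem hlt]

theorem foldl_set_range {α : Type} (d : α) (c : Nat → α → Bool) (f : Nat → α → α)
    (step : List α → Nat → List α)
    (hstep : ∀ s i, step s i = if c i (s.getD i d) then s.set i (f i (s.getD i d)) else s)
    (sb : List α) :
    (List.range sb.length).foldl step sb
      = (List.range sb.length).map (fun i => if c i (sb.getD i d) then f i (sb.getD i d) else sb.getD i d) := by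
  rw [foldl_set_range_aux d c f step hstep sb sb.length le_rfl]
  simp

theorem map_range_eq_map {α β : Type} (l : List α) (f : α → β) (F : Nat → β)
    (h : ∀ i : Nat, ∀ hi : i < l.length, F i = f l[i]) :
    (List.range l.length).map F = l.map f := by
  apply List.ext_getElem
  · simp
  · intro i h1 h2
    simp only [List.getElem_map, List.getElem_range]
    exact h i (by simpa using h2)

theorem le_max?_getD (l : List Int) (x : Int) (hx : x ∈ l) :
    x ≤ (PySem.List.max? l (fun y => y)).getD 0 := by
  obtain ⟨m, hm⟩ : ∃ m, PySem.List.max? l (fun y => y) = some m := by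
    cases h : PySem.List.max? l (fun y => y) with
    | none =>
      rw [PySem.List.max?_eq_none_iff] at h
      subst h; simp at hx
    | some m => exact ⟨m, rfl⟩
  rw [hm]
  exact PySem.List.max?_isMax hm x hx

theorem min?_getD_le (l : List Int) (x : Int) (hx : x ∈ l) :
    (PySem.List.min? l (fun y => y)).getD 0 ≤ x := by
  obtain ⟨m, hm⟩ : ∃ m, PySem.List.min? l (fun y => y) = some m := by
    cases h : PySem.List.min? l (fun y => y) with
    | none =>
      rw [PySem.List.min?_eq_none_iff] at h
      subst h; simp at hx
    | some m => exact ⟨m, rfl⟩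
  rw [hm]
  exact PySem.List.min?_isMin hm x hx

theorem dedup_sum_eq_range_sum (t : List Int) (n : Nat) (g : Int → Int) :
    ((PySem.List.dedup t).map (fun r => if 1 ≤ r ∧ r ≤ (n : Int) then g r else 0)).sum
      = ((List.range n).map (fun (i : Nat) => if ((i : Int) + 1) ∈ t then g ((i : Int) + 1) else 0)).sum := by
  have hL : ((PySem.List.dedup t).map (fun r => if 1 ≤ r ∧ r ≤ (n : Int) then g r else 0)).sum
      = ∑ x ∈ t.toFinset, (if 1 ≤ x ∧ x ≤ (n : Int) then g x else 0) := by
    rw [← List.sum_toFinset _ (PySem.List.nodup_dedup t)]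
    congr 1
    ext x
    simp
  have hR : ((List.range n).map (fun (i : Nat) => if ((i : Int) + 1) ∈ t then g ((i : Int) + 1) else 0)).sum
      = ∑ i ∈ Finset.range n, (if ((i : Int) + 1) ∈ t then g ((i : Int) + 1) else 0) := rfl
  rw [hL, hR, ← Finset.sum_filter, ← Finset.sum_filter]
  refine Finset.sum_nbij' (i := fun (x : Int) => (x - 1).toNat) (j := fun (i : Nat) => (i : Int) + 1) ?_ ?_ ?_ ?_ ?_
  · intro a ha
    simp only [Finset.mem_filter, List.mem_toFinset, Finset.mem_range] at ha ⊢
    constructor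
    · omega
    · have : ((a - 1).toNat : Int) + 1 = a := by omega
      rw [this]; exact ha.1
  · intro b hb
    simp only [Finset.mem_filter, List.mem_toFinset, Finset.mem_range] at hb ⊢
    refine ⟨hb.2, by omega, by omega⟩
  · intro a ha
    simp only [Finset.mem_filter, List.mem_toFinset] at ha
    show ((a - 1).toNat : Int) + 1 = a
    omega
  · intro b _
    show ((((b : Int) + 1) - 1).toNat : Nat) = b
    omega
  · intro a ha
    simp only [Finset.mem_filter, List.mem_toFinset] at ha
    have : ((a - 1).toNat : Int) + 1 = a := by omega
    rw [this]

-- the outer zero pass distributes into an independent per-row fold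
theorem zero_fold (zc : Nat → Nat → Bool) (zstep : List (List Int) → Nat → List (List Int))
    (hzstep : ∀ sb col, zstep sb col
      = (List.range sb.length).foldl (fun sb (row : Nat) =>
          if zc col row then sb.set row ((sb.getD row []).set col 0) else sb) sb)
    (n : Nat) (r : Nat → List Int) :
    ∀ k, (List.range k).foldl zstep ((List.range n).map r)
      = (List.range n).map (fun i =>
          (List.range k).foldl (fun row c => if zc c i then row.set c 0 else row) (r i)) := by
  intro k
  induction k with
  | zero => simp
  | succ k ih =>
    rw [List.range_succ, List.foldl_append, ih]
    simp only [List.foldl_cons, List.foldl_nil]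
    rw [hzstep]
    rw [foldl_set_range [] (fun i _ => zc k i) (fun _ row => row.set k 0) _ (fun s i => rfl)]
    simp only [List.length_map, List.length_range]
    apply List.map_congr_left
    intro i hi
    simp only [List.mem_range] at hi
    have hprev : ((List.range n).map (fun i =>
        (List.range k).foldl (fun row c => if zc c i then row.set c 0 else row) (r i))).getD i []
        = (List.range k).foldl (fun row c => if zc c i then row.set c 0 else row) (r i) := by
      simp [List.getD_eq_getElem?_getD, List.getElem?_map, List.getElem?_range, hi]
    rw [hprev]
    rw [List.foldl_append]
    simp only [List.foldl_cons, List.foldl_nil]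

theorem impossible_facts (front side : List Int) (top : List (List Int))
    (h : impossible_case front side top = false) :
    front ≠ [] ∧ front.length = top.length ∧ ∀ t ∈ top, t ≠ [] := by
  unfold impossible_case at h
  split_ifs at h with h1 h2 h3 h4 h5 h6
  · refine ⟨?_, by omega, ?_⟩
    · intro he; subst he; simp at h1
    · intro t ht he; subst he
      exact absurd (List.any_eq_true.mpr ⟨[], ht, by simp⟩) h3


-- A's value after the guard: grid sum in closed form
theorem solA (front side : List Int) (top : List (List Int))
    (hf : impossible_case front side top = false) :
    solution front side top
      = ((List.range side.length).map (fun (i : Nat) =>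
          ((List.range top.length).map (fun (c : Nat) =>
            if ((i : Int) + 1) ∈ top.getD c [] then min (front.getD c 0) (side.getD i 0) else 0)).sum)).sum := by
  obtain ⟨hfne, hlen, htne⟩ := impossible_facts front side top hf
  unfold solution
  rw [hf]
  simp only [Bool.false_eq_true, if_false]
  rw [PySem.List.foldl_append_singleton_eq_map]
  simp only [List.nil_append]
  have hclip := foldl_set_range ([] : List Int)
      (fun i row => decide ((PySem.List.max? row fun x => x).getD 0 > side.getD i 0))
      (fun i row => List.foldl (fun r c => if r.getD c 0 > side.getD i 0 then r.set c (side.getD i 0) else r) row (List.range front.length))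
      (fun sb i =>
        if (PySem.List.max? (sb.getD i []) fun x => x).getD 0 > side.getD i 0 then
          sb.set i (List.foldl (fun r c => if r.getD c 0 > side.getD i 0 then r.set c (side.getD i 0) else r) (sb.getD i []) (List.range front.length))
        else sb)
      (by
        intro s i
        by_cases hc : (PySem.List.max? (s.getD i []) fun x => x).getD 0 > side.getD i 0 <;> simp [hc])
      (List.map (fun x => front) (List.range side.length))
  rw [hclip]
  have hrow : (List.range (List.map (fun (x : Nat) => front) (List.range side.length)).length).map
        (fun i => if (fun i row => decide ((PySem.List.max? row fun x => x).getD 0 > side.getD i 0)) i ((List.map (fun (x : Nat) => front) (List.range side.length)).getD i [])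
          then (fun i row => List.foldl (fun r c => if r.getD c 0 > side.getD i 0 then r.set c (side.getD i 0) else r) row (List.range front.length)) i ((List.map (fun (x : Nat) => front) (List.range side.length)).getD i [])
          else (List.map (fun (x : Nat) => front) (List.range side.length)).getD i [])
      = (List.range side.length).map (fun i => front.map (fun x => min x (side.getD i 0))) := by
    simp only [List.length_map, List.length_range]
    apply List.map_congr_left
    intro i hi
    simp only [List.mem_range] at hi
    have hgd : (List.map (fun (x : Nat) => front) (List.range side.length)).getD i [] = front := by
      simp [List.getD_eq_getElem?_getD, List.getElem?_map, List.getElem?_range, hi]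
    rw [hgd]
    by_cases hc : (PySem.List.max? front fun x => x).getD 0 > side.getD i 0
    · simp only [hc, decide_true, if_true]
      rw [foldl_set_range (0 : Int) (fun c x => decide (x > side.getD i 0)) (fun _ _ => side.getD i 0)
        (fun r c => if r.getD c 0 > side.getD i 0 then r.set c (side.getD i 0) else r)
        (by intro s c; by_cases h2 : s.getD c 0 > side.getD i 0 <;> simp [h2]) front]
      apply map_range_eq_map
      intro c hc2
      have hfc : front.getD c 0 = front[c] := by
        simp [List.getD_eq_getElem?_getD, List.getElem?_eq_getElem hc2]
      rw [hfc]
      by_cases h3 : front[c] > side.getD i 0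
      · simp only [h3, decide_true, if_true]
        omega
      · simp only [h3, decide_false, Bool.false_eq_true, if_false]
        omega
    · simp only [hc, decide_false, Bool.false_eq_true, if_false]
      have hmin : ∀ x ∈ front, min x (side.getD i 0) = x := by
        intro x hx
        have h1 := le_max?_getD front x hx
        omega
      rw [List.map_congr_left hmin]
      simp
  rw [hrow]
  rw [zero_fold
      (fun col row => (decide ((row : Int) < (PySem.List.min? (top.getD col []) fun x => x).getD 0 - 1) ||
          decide ((row : Int) > (PySem.List.max? (top.getD col []) fun x => x).getD 0 - 1) ||
          !(top.getD col []).contains ((row : Int) + 1)))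
      (fun sb col =>
        List.foldl
          (fun sb (row : Nat) =>
            if (decide ((row : Int) < (PySem.List.min? (top.getD col []) fun x => x).getD 0 - 1) ||
                  decide ((row : Int) > (PySem.List.max? (top.getD col []) fun x => x).getD 0 - 1) ||
                  !(top.getD col []).contains ((row : Int) + 1)) = true then
              sb.set row ((sb.getD row []).set col 0)
            else sb)
          sb (List.range sb.length))
      (by intro sb col; rfl)
      side.length
      (fun i => front.map (fun x => min x (side.getD i 0)))
      top.length]
  rw [PySem.List.foldl_add]
  simp only [zero_add, List.map_map]
  apply congrArg List.sum
  apply List.map_congr_left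
  intro i hi
  simp only [List.mem_range] at hi
  simp only [Function.comp_apply]
  rw [show List.range top.length = List.range (front.map (fun x => min x (side.getD i 0))).length by
    simp [hlen]]
  rw [foldl_set_range (0 : Int)
      (fun c _ => (decide ((i : Int) < (PySem.List.min? (top.getD c []) fun x => x).getD 0 - 1) ||
          decide ((i : Int) > (PySem.List.max? (top.getD c []) fun x => x).getD 0 - 1) ||
          !(top.getD c []).contains ((i : Int) + 1)))
      (fun _ _ => (0 : Int))
      (fun row c =>
        if (decide ((i : Int) < (PySem.List.min? (top.getD c []) fun x => x).getD 0 - 1) ||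
              decide ((i : Int) > (PySem.List.max? (top.getD c []) fun x => x).getD 0 - 1) ||
              !(top.getD c []).contains ((i : Int) + 1)) = true then
          row.set c 0
        else row)
      (by intro s c; rfl)
      (front.map (fun x => min x (side.getD i 0)))]
  apply congrArg List.sum
  simp only [List.length_map]
  rw [hlen]
  apply List.map_congr_left
  intro c hcm
  simp only [List.mem_range] at hcm
  have hclt : c < front.length := by omega
  have hget : (front.map (fun x => min x (side.getD i 0))).getD c 0
      = min (front.getD c 0) (side.getD i 0) := by
    simp [List.getD_eq_getElem?_getD, List.getElem?_map, List.getElem?_eq_getElem hclt]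
  rw [hget]
  have htmem : top.getD c [] ∈ top := by
    have : top.getD c [] = top[c] := by
      simp [List.getD_eq_getElem?_getD, List.getElem?_eq_getElem hcm]
    rw [this]
    exact List.getElem_mem hcm
  cases hb : (top.getD c []).contains ((i : Int) + 1) with
  | false =>
    have hnm : ¬ ((i : Int) + 1) ∈ top.getD c [] := by
      simpa using hb
    simp only [List.getD_eq_getElem?_getD] at hb hnm ⊢
    simp [hb, hnm]
  | true =>
    have hmem : ((i : Int) + 1) ∈ top.getD c [] := by
      simpa using hb
    have h1 : ¬ ((i : Int) < (PySem.List.min? (top.getD c []) fun x => x).getD 0 - 1) := by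
      have := min?_getD_le (top.getD c []) _ hmem
      omega
    have h2 : ¬ ((i : Int) > (PySem.List.max? (top.getD c []) fun x => x).getD 0 - 1) := by
      have := le_max?_getD (top.getD c []) _ hmem
      omega
    simp only [List.getD_eq_getElem?_getD] at hb hmem h1 h2 ⊢
    simp [hb, hmem, h1, h2]


-- B's value after the guard: same closed form, summed column-first
theorem solB (front side : List Int) (top : List (List Int))
    (hf : impossible_case front side top = false) :
    solution_alt front side top
      = ((List.range top.length).map (fun (c : Nat) =>
          ((List.range side.length).map (fun (i : Nat) =>
            if ((i : Int) + 1) ∈ top.getD c [] then min (front.getD c 0) (side.getD i 0) else 0)).sum)).sum := by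
  unfold solution_alt
  rw [hf]
  simp only [Bool.false_eq_true, if_false]
  have hstep : ∀ col : Nat, (fun (ans : Int) (r : Int) =>
        if 1 ≤ r ∧ r ≤ (side.length : Int) then ans + min (front.getD col 0) (side.getD (r - 1).toNat 0) else ans)
      = (fun (ans : Int) (r : Int) =>
        ans + if 1 ≤ r ∧ r ≤ (side.length : Int) then min (front.getD col 0) (side.getD (r - 1).toNat 0) else 0) := by
    intro col
    funext ans r
    split_ifs <;> simp
  have hinner : ∀ (ans : Int) (col : Nat),
      (PySem.Set.ofList (top.getD col [])).foldl (fun ans r =>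
        if 1 ≤ r ∧ r ≤ (side.length : Int) then ans + min (front.getD col 0) (side.getD (r - 1).toNat 0) else ans) ans
      = ans + ((List.range side.length).map (fun (i : Nat) =>
          if ((i : Int) + 1) ∈ top.getD col [] then min (front.getD col 0) (side.getD i 0) else 0)).sum := by
    intro ans col
    rw [hstep col, PySem.List.foldl_add]
    congr 1
    rw [show (PySem.Set.ofList (top.getD col []) : List Int) = PySem.List.dedup (top.getD col []) from (PySem.List.dedup_eq_ofList _).symm]
    rw [dedup_sum_eq_range_sum (top.getD col []) side.length (fun r => min (front.getD col 0) (side.getD (r - 1).toNat 0))]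
    congr 1
    apply List.map_congr_left
    intro i _
    have h1 : ((i : Int) + 1 - 1).toNat = i := by omega
    rw [h1]
  have houter : (fun (ans : Int) (col : Nat) =>
      (PySem.Set.ofList (top.getD col [])).foldl (fun ans r =>
        if 1 ≤ r ∧ r ≤ (side.length : Int) then ans + min (front.getD col 0) (side.getD (r - 1).toNat 0) else ans) ans)
      = (fun (ans : Int) (col : Nat) =>
      ans + ((List.range side.length).map (fun (i : Nat) =>
          if ((i : Int) + 1) ∈ top.getD col [] then min (front.getD col 0) (side.getD i 0) else 0)).sum) := by
    funext ans col
    exact hinner ans col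
  rw [houter, PySem.List.foldl_add]
  simp

-- ===== VERDICT (by name: the statement is the Claim_ definition above) =====
theorem solution_spec : Claim_equal_solution := by
  intro front side top _
  show solution front side top = solution_alt front side top
  by_cases h : impossible_case front side top
  · unfold solution solution_alt
    simp [h]
  · have hf : impossible_case front side top = false := by
      revert h; cases impossible_case front side top <;> simp
    rw [solA front side top hf, solB front side top hf]
    exact Finset.sum_comm (s := Finset.range side.length) (t := Finset.range top.length)
      (f := fun i c => if ((i : Int) + 1) ∈ top.getD c [] then min (front.getD c 0) (side.getD i 0) else 0)
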